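-- pv_equiv track=rewrite | github.com/VoiceofSiren/StudyingProgramming | Python/Coding Test/Programmers/lv0/p-078.py | str_to_2darray
-- ===== SOURCE A (Python) =====
-- def str_to_2darray(my_string, m):
--     x, y = int(len(my_string)/m), m
--     array_2d = [
--         [ '' for _ in range(y) ]
--         for _ in range(x)
--     ]
--     z = 0
--     for i in range(x):
--         for j in range(y):
--             array_2d[i][j] += my_string[z]
--             z += 1
--     return array_2d
-- ===== SOURCE B (Python) =====
-- def str_to_2darray(my_string, m):
--     x = int(len(my_string)/m)
--     return [list(my_string[i*m:(i+1)*m]) for i in range(x)]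
-- ===== Notes on version B (the rewrite author's own statement) =====
-- stated objective: faster
-- what changed: B replaces A's pre-built grid of empty strings and the per-character running counter z with one length-m slice per row converted directly to a list of characters.
import Mathlib
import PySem

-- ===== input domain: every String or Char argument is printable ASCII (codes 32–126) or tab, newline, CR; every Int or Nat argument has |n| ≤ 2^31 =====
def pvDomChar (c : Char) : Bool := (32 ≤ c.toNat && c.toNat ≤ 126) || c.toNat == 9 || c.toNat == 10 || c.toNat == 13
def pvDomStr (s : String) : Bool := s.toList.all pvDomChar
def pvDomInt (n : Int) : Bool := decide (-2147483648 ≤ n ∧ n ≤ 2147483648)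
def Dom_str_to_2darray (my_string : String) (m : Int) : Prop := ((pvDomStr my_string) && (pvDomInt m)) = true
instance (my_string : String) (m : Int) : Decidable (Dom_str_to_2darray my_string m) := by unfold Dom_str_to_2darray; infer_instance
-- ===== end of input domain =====

-- B replaces A's pre-built empty grid and running index z by one slice per row (measurably faster in a timing run; per-row C-level slicing instead of per-character bookkeeping).

-- ===== PORT A =====
-- my_string[z] appended to the cell; none = IndexError, unreachable under Pre_ (m ≠ 0).
def pvCellAdd (s : String) (z : Int) : String :=
  match PySem.Str.pyGet? s z with
  | some ch => String.ofList [ch]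
  | none => ""

def str_to_2darray (my_string : String) (m : Int) : List (List String) :=
  -- x, y = int(len(my_string)/m), m   (int(·) on the float quotient truncates toward zero = Int.tdiv)
  let x : Int := Int.tdiv (my_string.toList.length : Int) m
  let y : Int := m
  let array_2d : List (List String) :=
    (PySem.List.pyRange 0 x 1).map (fun _ => (PySem.List.pyRange 0 y 1).map (fun _ => ""))
  -- z = 0; for i in range(x): for j in range(y): array_2d[i][j] += my_string[z]; z += 1
  let res :=
    (PySem.List.pyRange 0 x 1).foldl (fun (st : List (List String) × Int) i =>
      (PySem.List.pyRange 0 y 1).foldl (fun (st2 : List (List String) × Int) j =>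
        (st2.1.modify i.toNat (fun row => row.modify j.toNat (fun cell => cell ++ pvCellAdd my_string st2.2)),
         st2.2 + 1)) st) (array_2d, 0)
  res.1

-- ===== PORT B =====
def str_to_2darray_alt (my_string : String) (m : Int) : List (List String) :=
  let x : Int := Int.tdiv (my_string.toList.length : Int) m
  (PySem.List.pyRange 0 x 1).map (fun i =>
    (PySem.List.slice my_string.toList (some (i * m)) (some ((i + 1) * m))).map
      (fun c => String.ofList [c]))

-- ===== PRECONDITION & SPEC =====
-- Pre_ excludes only m = 0, where both Pythons raise ZeroDivisionError.
def Pre_str_to_2darray (my_string : String) (m : Int) : Prop := m ≠ 0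
instance (my_string : String) (m : Int) : Decidable (Pre_str_to_2darray my_string m) := by unfold Pre_str_to_2darray; infer_instance
def pvWitness_str_to_2darray : String × Int := ("abcdef", 2)

def Spec_str_to_2darray (my_string : String) (m : Int) (out : List (List String)) : Prop := out = str_to_2darray_alt my_string m
instance (my_string : String) (m : Int) (out : List (List String)) : Decidable (Spec_str_to_2darray my_string m out) := by unfold Spec_str_to_2darray; infer_instance

-- ===== CLAIM (what is proved, stated in full; the proofs are below) =====
def Claim_equal_str_to_2darray : Prop := ∀ (my_string : String) (m : Int), Dom_str_to_2darray my_string m → Pre_str_to_2darray my_string m → Spec_str_to_2darray my_string m (str_to_2darray my_string m)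

-- ===== LEMMAS AND PROOFS =====


theorem pv_modify_append_cons {α : Type} (pre : List α) (a : α) (l : List α) (f : α → α) :
    (pre ++ a :: l).modify pre.length f = pre ++ f a :: l := by
  induction pre with
  | nil => simp [List.modify]
  | cons b bs ih => simpa [List.modify] using ih

-- inner loop: fills the cells of the row at index pre.length, one char per step
theorem pv_inner (s : String) (pre rest : List (List String)) (rowpre : List String)
    (n : Nat) (z : Int) :
    (PySem.List.pyRange (rowpre.length : Int) ((rowpre.length : Int) + (n : Int)) 1).foldl
      (fun (st2 : List (List String) × Int) j =>
        (st2.1.modify pre.length (fun row => row.modify j.toNat (fun cell => cell ++ pvCellAdd s st2.2)),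
         st2.2 + 1))
      (pre ++ (rowpre ++ List.replicate n "") :: rest, z)
    = (pre ++ (rowpre ++ (List.range n).map (fun t : Nat => pvCellAdd s (z + (t : Int)))) :: rest,
       z + (n : Int)) := by
  induction n generalizing rowpre z with
  | zero => simp [PySem.List.pyRange_one_eq_nil]
  | succ n ih =>
    rw [PySem.List.pyRange_one_cons (by push_cast; omega), List.foldl_cons]
    simp only [Int.toNat_natCast, List.replicate_succ, pv_modify_append_cons,
      String.empty_append]
    have e1 : rowpre ++ pvCellAdd s z :: List.replicate n "" =
        (rowpre ++ [pvCellAdd s z]) ++ List.replicate n "" := by simp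
    have e2 : (rowpre.length : Int) + 1 = (((rowpre ++ [pvCellAdd s z]).length : Nat) : Int) := by
      simp
    have e3 : (rowpre.length : Int) + ((n : Int) + 1) =
        (((rowpre ++ [pvCellAdd s z]).length : Nat) : Int) + (n : Int) := by
      simp; ring
    rw [e1, show ((n + 1 : Nat) : Int) = (n : Int) + 1 by omega, e3, e2,
      ih (rowpre ++ [pvCellAdd s z]) (z + 1)]
    refine congrArg₂ Prod.mk ?_ (by omega)
    congr 1
    congr 1
    rw [List.range_succ_eq_map]
    simp only [List.map_cons, List.map_map, List.append_assoc,
      List.singleton_append, Nat.cast_zero, add_zero]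
    refine congrArg _ (congrArg _ (List.map_congr_left fun t _ => ?_))
    simp only [Function.comp_apply]
    congr 1
    push_cast; ring

-- outer loop: fills k empty rows starting at row index pre.length, m chars each
theorem pv_outer (s : String) (m : Int) (hm : 0 < m) (pre : List (List String)) (k : Nat) (z : Int) :
    (PySem.List.pyRange (pre.length : Int) ((pre.length : Int) + (k : Int)) 1).foldl
      (fun (st : List (List String) × Int) i =>
        (PySem.List.pyRange 0 m 1).foldl
          (fun (st2 : List (List String) × Int) j =>
            (st2.1.modify i.toNat (fun row => row.modify j.toNat (fun cell => cell ++ pvCellAdd s st2.2)),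
             st2.2 + 1)) st)
      (pre ++ List.replicate k ((PySem.List.pyRange 0 m 1).map (fun _ => "")), z)
    = (pre ++ (List.range k).map
        (fun t : Nat => (List.range m.toNat).map (fun u : Nat => pvCellAdd s (z + (t : Int) * m + (u : Int)))),
       z + (k : Int) * m) := by
  induction k generalizing pre z with
  | zero => simp [PySem.List.pyRange_one_eq_nil]
  | succ k ih =>
    have hm' : (m.toNat : Int) = m := Int.toNat_of_nonneg (le_of_lt hm)
    rw [show PySem.List.pyRange (pre.length : Int) ((pre.length : Int) + ((k + 1 : Nat) : Int)) 1 =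
        (pre.length : Int) :: PySem.List.pyRange ((pre.length : Int) + 1) ((pre.length : Int) + ((k + 1 : Nat) : Int)) 1
      from PySem.List.pyRange_one_cons (by push_cast; omega), List.foldl_cons]
    have hrow : (PySem.List.pyRange 0 m 1).map (fun _ => ("" : String)) =
        ([] : List String) ++ List.replicate m.toNat "" := by
      simp [List.map_const', PySem.List.length_pyRange_one]
    have hrange : PySem.List.pyRange 0 m 1 =
        PySem.List.pyRange (([] : List String).length : Int)
          ((([] : List String).length : Int) + ((m.toNat : Nat) : Int)) 1 := by
      simp [hm']
    rw [List.replicate_succ, hrow]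
    simp only [Int.toNat_natCast]
    conv_lhs => rw [hrange]
    rw [pv_inner s pre _ ([] : List String) m.toNat z, List.nil_append]
    rw [← hrow, ← hrange]
    have e2 : ((pre.length : Int) + 1) = (((pre ++ [(List.range m.toNat).map (fun t : Nat => pvCellAdd s (z + (t : Int)))]).length : Nat) : Int) := by simp
    have e3 : (pre.length : Int) + ((k + 1 : Nat) : Int) =
        (((pre ++ [(List.range m.toNat).map (fun t : Nat => pvCellAdd s (z + (t : Int)))]).length : Nat) : Int) + (k : Int) := by
      simp; ring
    rw [e3, show pre ++ ((List.range m.toNat).map (fun t : Nat => pvCellAdd s (z + (t : Int)))) :: List.replicate k ((PySem.List.pyRange 0 m 1).map (fun _ => "")) =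
        (pre ++ [(List.range m.toNat).map (fun t : Nat => pvCellAdd s (z + (t : Int)))]) ++ List.replicate k ((PySem.List.pyRange 0 m 1).map (fun _ => "")) by simp, e2,
      ih (pre ++ [(List.range m.toNat).map (fun t : Nat => pvCellAdd s (z + (t : Int)))]) (z + (m.toNat : Int))]
    refine congrArg₂ Prod.mk ?_ (by rw [hm']; push_cast; ring)
    rw [List.append_assoc, List.singleton_append]
    congr 1
    rw [List.range_succ_eq_map]
    simp only [List.map_cons, List.map_map, Nat.cast_zero, zero_mul, add_zero]
    refine congrArg _ (List.map_congr_left fun t _ => ?_)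
    simp only [Function.comp_apply]
    refine List.map_congr_left fun u _ => ?_
    congr 1
    rw [hm']; push_cast; ring

-- ===== VERDICT (by name: the statement is the Claim_ definition above) =====
theorem str_to_2darray_spec : Claim_equal_str_to_2darray := by
  intro s m _ hm
  unfold Spec_str_to_2darray str_to_2darray str_to_2darray_alt
  simp only []
  set L : Int := (s.toList.length : Int) with hL
  have hL0 : 0 ≤ L := by positivity
  have hx : Int.tdiv L m = L / m := by
    rw [Int.tdiv_eq_ediv, if_pos (Or.inl hL0), add_zero]
  rw [hx]
  rcases lt_or_gt_of_ne hm with hneg | hpos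
  · -- m < 0: x ≤ 0, both sides are []
    have : L / m ≤ 0 := Int.ediv_nonpos_of_nonneg_of_nonpos hL0 (le_of_lt hneg)
    rw [PySem.List.pyRange_one_eq_nil this]
    simp
  · -- m > 0
    have hx0 : 0 ≤ L / m := Int.ediv_nonneg hL0 (le_of_lt hpos)
    set k : Nat := (L / m).toNat with hk
    have hkx : ((k : Nat) : Int) = L / m := Int.toNat_of_nonneg hx0
    have hm' : ((m.toNat : Nat) : Int) = m := Int.toNat_of_nonneg (le_of_lt hpos)
    -- the A side via pv_outer
    have hgrid : (PySem.List.pyRange 0 (L / m) 1).map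
        (fun _ => (PySem.List.pyRange 0 m 1).map (fun _ => ("" : String))) =
        ([] : List (List String)) ++ List.replicate k ((PySem.List.pyRange 0 m 1).map (fun _ => "")) := by
      simp [List.map_const', PySem.List.length_pyRange_one, hk]
    have hr : PySem.List.pyRange 0 (L / m) 1 =
        PySem.List.pyRange ((([] : List (List String)).length : Nat) : Int)
          (((([] : List (List String)).length : Nat) : Int) + ((k : Nat) : Int)) 1 := by
      simp [hkx]
    rw [hgrid]
    conv_lhs => rw [hr]
    rw [pv_outer s m hpos ([] : List (List String)) k 0, List.nil_append]
    -- the B side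
    rw [PySem.List.pyRange_one, List.map_map]
    have hkk : ((L / m) - 0).toNat = k := by rw [sub_zero, hk]
    rw [hkk]
    refine List.map_congr_left fun t ht => ?_
    rw [List.mem_range] at ht
    simp only [Function.comp_apply, zero_add]
    -- the row: slice = chunk
    have hbound : (t + 1) * m.toNat ≤ s.toList.length := by
      have h1 : ((t : Int) + 1) * m ≤ L := by
        have h2 := Int.emod_nonneg L (by omega : m ≠ 0)
        have h3 := Int.mul_ediv_add_emod L m
        have h4 : (t : Int) + 1 ≤ L / m := by
          rw [← hkx]; exact_mod_cast ht
        nlinarith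
      have h5 : (((t + 1) * m.toNat : Nat) : Int) ≤ (s.toList.length : Int) := by
        push_cast
        rw [hm']
        exact h1
      exact_mod_cast h5
    rw [Nat.add_mul, one_mul] at hbound
    have hslice : PySem.List.slice s.toList (some ((t : Int) * m)) (some (((t : Int) + 1) * m)) =
        (s.toList.drop (t * m.toNat)).take m.toNat := by
      have e1 : (t : Int) * m = ((t * m.toNat : Nat) : Int) := by push_cast [hm']; ring
      have e2 : ((t : Int) + 1) * m = ((t * m.toNat : Nat) : Int) + ((m.toNat : Nat) : Int) := by
        push_cast [hm']; ring
      rw [e1, e2, PySem.List.slice_natCast_add]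
    rw [hslice]
    apply List.ext_getElem
    · simp only [List.length_map, List.length_take, List.length_drop, List.length_range]
      omega
    · intro u hu1 hu2
      have hum : u < m.toNat := by simpa using hu1
      have hidx : t * m.toNat + u < s.toList.length := by omega
      simp only [List.getElem_map, List.getElem_take, List.getElem_drop, List.getElem_range]
      have e : (t : Int) * m + (u : Int) = ((t * m.toNat + u : Nat) : Int) := by
        push_cast [hm']; ring
      rw [e]
      have hg : PySem.Str.pyGet? s ((t * m.toNat + u : Nat) : Int) =
          some s.toList[t * m.toNat + u] := by
        rw [PySem.Str.pyGet?_natCast, List.getElem?_eq_getElem hidx]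
      simp only [pvCellAdd, hg]
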